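-- pv_equiv track=rewrite | github.com/vtramo/neural-networks-experiments-from-scratch | nnkit/utils.py | fair_divide
-- ===== SOURCE A (Python) =====
-- def fair_divide(iterable, workers: int) -> list[list, ...]:
--     partition = []
--     count = len(iterable) // workers
--     remainder = len(iterable) % workers
--
--     for i in range(workers):
--         if i < remainder:
--             start = i * (count + 1)
--             stop = start + count
--         else:
--             start = i * count + remainder
--             stop = start + (count - 1)
--         partition.append(iterable[start:stop + 1])
--
--     return partition
-- ===== SOURCE B (Python) =====
-- def fair_divide(iterable, workers: int) -> list[list, ...]:
--     partition = []
--     start = 0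
--     w = workers
--     while w > 0:
--         size = (len(iterable) - start + w - 1) // w  # ceil: largest fair chunk of what is left
--         partition.append(iterable[start:start + size])
--         start += size
--         w -= 1
--     return partition
-- ===== Notes on version B (the rewrite author's own statement) =====
-- stated objective: alternative
-- what changed: B never computes len//workers or len%workers: it repeatedly peels the ceiling-sized chunk ceil(remaining/w) at a running cursor while decrementing the remaining worker count w, instead of A's indexed loop that recomputes each slice's start/stop from per-worker closed-form formulas over the precomputed quotient and remainder.
import Mathlib
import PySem

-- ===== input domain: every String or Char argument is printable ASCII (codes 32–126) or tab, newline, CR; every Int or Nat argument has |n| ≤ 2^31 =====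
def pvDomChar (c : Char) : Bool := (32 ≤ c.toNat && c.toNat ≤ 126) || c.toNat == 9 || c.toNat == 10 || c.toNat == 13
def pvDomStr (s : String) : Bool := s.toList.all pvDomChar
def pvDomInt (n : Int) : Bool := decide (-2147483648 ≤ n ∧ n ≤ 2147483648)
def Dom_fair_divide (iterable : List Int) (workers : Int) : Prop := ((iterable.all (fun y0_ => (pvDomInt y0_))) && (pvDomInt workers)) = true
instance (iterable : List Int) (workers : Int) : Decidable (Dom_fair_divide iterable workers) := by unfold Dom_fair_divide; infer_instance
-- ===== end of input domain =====

-- B never computes len//workers or len%workers: it repeatedly peels the ceiling-sized chunk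
-- ceil(remaining/w) at a running cursor, decrementing the remaining worker count (objective: alternative).

-- ===== PORT A =====
def fair_divide (iterable : List Int) (workers : Int) : List (List Int) :=
  let count := PySem.Int.floordiv (iterable.length : Int) workers
  let remainder := PySem.Int.mod (iterable.length : Int) workers
  (PySem.List.pyRange 0 workers 1).foldl
    (fun partition i =>
      let se : Int × Int :=
        if i < remainder then
          let start := i * (count + 1)
          (start, start + count)
        else
          let start := i * count + remainder
          (start, start + (count - 1))
      partition ++ [PySem.List.slice iterable (some se.1) (some (se.2 + 1))])
    []

-- ===== PORT B =====
-- the while loop of Source B: state (start, w, partition), runs while 0 < w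
def fairDivideGo (iterable : List Int) (start : Int) (w : Int) (partition : List (List Int)) : List (List Int) :=
  if h : 0 < w then
    let size := PySem.Int.floordiv ((iterable.length : Int) - start + w - 1) w
    fairDivideGo iterable (start + size) (w - 1)
      (partition ++ [PySem.List.slice iterable (some start) (some (start + size))])
  else partition
termination_by w.toNat
decreasing_by omega

def fair_divide_alt (iterable : List Int) (workers : Int) : List (List Int) :=
  fairDivideGo iterable 0 workers []

-- ===== PRECONDITION & SPEC =====
-- Pre_ excludes exactly workers = 0, where Python A raises ZeroDivisionError.
def Pre_fair_divide (iterable : List Int) (workers : Int) : Prop := workers ≠ 0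
instance (iterable : List Int) (workers : Int) : Decidable (Pre_fair_divide iterable workers) := by unfold Pre_fair_divide; infer_instance
def pvWitness_fair_divide : List Int × Int := ([1, 2, 3, 4, 5], 2)

def Spec_fair_divide (iterable : List Int) (workers : Int) (out : List (List Int)) : Prop := out = fair_divide_alt iterable workers
instance (iterable : List Int) (workers : Int) (out : List (List Int)) : Decidable (Spec_fair_divide iterable workers out) := by unfold Spec_fair_divide; infer_instance

-- ===== CLAIM (what is proved, stated in full; the proofs are below) =====
def Claim_equal_fair_divide : Prop := ∀ (iterable : List Int) (workers : Int), Dom_fair_divide iterable workers → Pre_fair_divide iterable workers → Spec_fair_divide iterable workers (fair_divide iterable workers)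

-- ===== LEMMAS AND PROOFS =====

-- chunk boundary i of splitting a list of length n into w parts (q = n//w, r = n%w)
def bnd (q r i : Int) : Int := i * q + min i r

-- common reference form: the i-th chunk is the slice between adjacent boundaries
def refDiv (xs : List Int) (w : Int) : List (List Int) :=
  let q := PySem.Int.floordiv (xs.length : Int) w
  let r := PySem.Int.mod (xs.length : Int) w
  (PySem.List.pyRange 0 w 1).map
    (fun i => PySem.List.slice xs (some (bnd q r i)) (some (bnd q r (i + 1))))

lemma A_eq_ref (xs : List Int) (w : Int) : fair_divide xs w = refDiv xs w := by
  unfold fair_divide refDiv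
  rw [PySem.List.foldl_append_singleton_eq_map]
  apply List.map_congr_left
  intro i hi
  rw [PySem.List.mem_pyRange_one] at hi
  set q := PySem.Int.floordiv (xs.length : Int) w with hq
  set r := PySem.Int.mod (xs.length : Int) w with hr
  have hr0 : 0 ≤ r := by
    rw [hr, PySem.Int.mod_eq_emod_of_pos (by omega)]
    exact Int.emod_nonneg _ (by omega)
  have hrw : r < w := by
    rw [hr, PySem.Int.mod_eq_emod_of_pos (by omega)]
    exact Int.emod_lt_of_pos _ (by omega)
  split_ifs with h
  · have h1 : min i r = i := by omega
    have h2 : min (i + 1) r = i + 1 := by omega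
    simp only [bnd, h1, h2]
    congr 2 <;> ring
  · have h1 : min i r = r := by omega
    have h2 : min (i + 1) r = r := by omega
    simp only [bnd, h1, h2]
    congr 2 <;> ring

lemma peel (xs : List Int) (w : Int) (hw : 0 < w) :
    refDiv xs w
      = PySem.List.slice xs none (some (PySem.Int.floordiv ((xs.length : Int) + w - 1) w))
        :: refDiv (PySem.List.slice xs (some (PySem.Int.floordiv ((xs.length : Int) + w - 1) w)) none) (w - 1) := by
  have hn0 : (0 : Int) ≤ (xs.length : Int) := Int.natCast_nonneg _
  set n := (xs.length : Int) with hn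
  set q := PySem.Int.floordiv n w with hqd
  set r := PySem.Int.mod n w with hrd
  set m := PySem.Int.floordiv (n + w - 1) w with hmd
  have hr0 : 0 ≤ r := by
    rw [hrd, PySem.Int.mod_eq_emod_of_pos hw]; exact Int.emod_nonneg _ (by omega)
  have hrw : r < w := by
    rw [hrd, PySem.Int.mod_eq_emod_of_pos hw]; exact Int.emod_lt_of_pos _ hw
  have hq0 : 0 ≤ q := by
    rw [hqd, PySem.Int.floordiv_eq_ediv_of_pos hw]; exact Int.ediv_nonneg hn0 (by omega)
  have hnqr : q * w + r = n := PySem.Int.floordiv_mul_add_mod n w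
  have hm : m = q + min 1 r := by
    rw [hmd, PySem.Int.floordiv_eq_iff_of_pos hw]
    rcases eq_or_lt_of_le hr0 with h0 | h1
    · rw [show min 1 r = 0 by omega]
      constructor <;> nlinarith
    · rw [show min 1 r = 1 by omega]
      constructor <;> nlinarith
  have hm0 : 0 ≤ m := by omega
  have hmn : m ≤ n := by
    have h1 : q ≤ q * w := by nlinarith
    have h2 : min 1 r ≤ r := by omega
    linarith
  have hys : PySem.List.slice xs (some m) none = xs.drop m.toNat := PySem.List.slice_from xs hm0
  have hlen : ((PySem.List.slice xs (some m) none).length : Int) = n - m := by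
    rw [hys]; simp [List.length_drop]; omega
  -- unfold the left-hand refDiv and peel its head
  simp only [refDiv]
  simp only [← hn, ← hqd, ← hrd]
  rw [PySem.List.pyRange_one_cons hw, List.map_cons]
  have hb0 : bnd q r 0 = 0 := by simp [bnd]; omega
  have hb1 : bnd q r (0 + 1) = m := by simp [bnd]; omega
  rw [hb0, hb1]
  rw [show PySem.List.slice xs (some 0) (some m) = PySem.List.slice xs none (some m) by
    simp [PySem.List.slice_zero_start]]
  congr 1
  -- tail
  by_cases hw1 : w = 1
  · subst hw1
    simp only [show (0:Int) + 1 = 1 from by norm_num, show (1:Int) - 1 = 0 from by norm_num]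
    rw [PySem.List.pyRange_one_eq_nil (le_refl 1), PySem.List.pyRange_one_eq_nil (le_refl 0)]
    simp
  · have hw2 : 2 ≤ w := by omega
    have hq' : PySem.Int.floordiv ((PySem.List.slice xs (some m) none).length : Int) (w - 1) = q := by
      rw [hlen, PySem.Int.floordiv_eq_iff_of_pos (by omega)]
      rcases eq_or_lt_of_le hr0 with h0 | h1
      · rw [show m = q by omega]
        constructor <;> nlinarith
      · rw [show m = q + 1 by omega]
        constructor <;> nlinarith
    have hr' : PySem.Int.mod ((PySem.List.slice xs (some m) none).length : Int) (w - 1) = r - min 1 r := by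
      have hid := PySem.Int.floordiv_mul_add_mod ((PySem.List.slice xs (some m) none).length : Int) (w - 1)
      rw [hq'] at hid
      rw [hlen] at hid
      rw [hlen]
      have hexp : q * (w - 1) = q * w - q := by ring
      omega
    rw [hq', hr']
    rw [show (0:Int) + 1 = 1 from by norm_num]
    rw [PySem.List.pyRange_one 1 w, PySem.List.pyRange_one 0 (w - 1)]
    rw [show w - 1 - 0 = w - 1 by ring]
    rw [List.map_map, List.map_map]
    apply List.map_congr_left
    intro k hk
    rw [List.mem_range] at hk
    simp only [Function.comp_apply]
    have hi0 : (0 : Int) ≤ (k : Int) := Int.natCast_nonneg _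
    have e1 : bnd q r (1 + (k : Int)) = m + bnd q (r - min 1 r) ((k : Int)) := by
      have hmin : min (1 + (k : Int)) r = min 1 r + min (k : Int) (r - min 1 r) := by omega
      simp only [bnd]; rw [hm, hmin]; ring
    have e2 : bnd q r (1 + (k : Int) + 1) = m + bnd q (r - min 1 r) ((k : Int) + 1) := by
      have hmin : min (1 + (k : Int) + 1) r = min 1 r + min ((k : Int) + 1) (r - min 1 r) := by omega
      simp only [bnd]; rw [hm, hmin]; ring
    have hbn : ∀ i : Int, 0 ≤ i → 0 ≤ bnd q (r - min 1 r) i := by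
      intro i hi
      have := mul_nonneg hi hq0
      simp only [bnd]; omega
    have hA1 : 0 ≤ bnd q r (1 + (k : Int)) := by rw [e1]; have := hbn _ hi0; omega
    have hA2 : 0 ≤ bnd q r (1 + (k : Int) + 1) := by rw [e2]; have := hbn _ (by omega : (0:Int) ≤ (k:Int) + 1); omega
    simp only [zero_add]
    rw [PySem.List.slice_toNat xs hA1 hA2,
        PySem.List.slice_toNat _ (hbn _ hi0) (hbn _ (by omega : (0:Int) ≤ (k:Int) + 1)),
        hys, List.drop_drop]
    have hB1 := hbn _ hi0
    have hB2 := hbn _ (by omega : (0:Int) ≤ (k:Int) + 1)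
    congr 1
    · omega
    · congr 1
      omega

lemma ceil_bounds (n w : Int) (hn : 0 ≤ n) (hw : 0 < w) :
    0 ≤ PySem.Int.floordiv (n + w - 1) w ∧ PySem.Int.floordiv (n + w - 1) w ≤ n := by
  rw [PySem.Int.floordiv_eq_ediv_of_pos hw]
  constructor
  · exact Int.ediv_nonneg (by omega) (by omega)
  · have h2 : (n + w - 1) / w < n + 1 := (Int.ediv_lt_iff_lt_mul hw).mpr (by nlinarith)
    omega

lemma go_eq (k : Nat) : ∀ (w : Int), w.toNat = k → ∀ (xs : List Int) (start : Int) (acc : List (List Int)),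
    0 ≤ start → start ≤ (xs.length : Int) →
    fairDivideGo xs start w acc = acc ++ refDiv (xs.drop start.toNat) w := by
  induction k with
  | zero =>
    intro w hk xs start acc h0 h1
    rw [fairDivideGo, dif_neg (by omega), refDiv]
    rw [PySem.List.pyRange_one_eq_nil (by omega)]
    simp
  | succ k ih =>
    intro w hk xs start acc h0 h1
    rw [fairDivideGo, dif_pos (by omega)]
    have hlen : ((xs.drop start.toNat).length : Int) = (xs.length : Int) - start := by
      simp [List.length_drop]; omega
    rw [show (xs.length : Int) - start + w - 1 = ((xs.drop start.toNat).length : Int) + w - 1 by omega]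
    obtain ⟨hs0, hsle⟩ := ceil_bounds ((xs.drop start.toNat).length : Int) w (by positivity) (by omega)
    rw [ih (w - 1) (by omega) xs _ _ (by omega) (by omega)]
    rw [peel (xs.drop start.toNat) w (by omega)]
    set size := PySem.Int.floordiv (((xs.drop start.toNat).length : Int) + w - 1) w with hszd
    have e1 : PySem.List.slice xs (some start) (some (start + size))
        = PySem.List.slice (xs.drop start.toNat) none (some size) := by
      rw [PySem.List.slice_toNat xs h0 (by omega), PySem.List.slice_to _ hs0]
      congr 1
      omega
    have e2 : xs.drop (start + size).toNat = PySem.List.slice (xs.drop start.toNat) (some size) none := by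
      rw [PySem.List.slice_from _ hs0, List.drop_drop]
      congr 1
      omega
    rw [e1, e2]
    simp

-- ===== VERDICT (by name: the statement is the Claim_ definition above) =====
theorem fair_divide_spec : Claim_equal_fair_divide := by
  intro xs w _ _
  unfold Spec_fair_divide fair_divide_alt
  rw [A_eq_ref, go_eq w.toNat w rfl xs 0 [] (le_refl 0) (Int.natCast_nonneg _), List.nil_append]
  norm_num
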